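-- pv_equiv track=rewrite | github.com/Joker3993/RLHGNN | utils.py | count_cases_with_repeated_activities
-- ===== SOURCE A (Python) =====
-- def count_cases_with_repeated_activities(sequences):
--     repeated_case_count = 0
--
--     for act_seq in sequences:
--         seen_activities = set()
--         has_repeated = False
--
--         for activity in act_seq:
--             if activity in seen_activities:
--                 has_repeated = True
--                 break
--             seen_activities.add(activity)
--
--         if has_repeated:
--             repeated_case_count += 1
--
--     return repeated_case_count
-- ===== SOURCE B (Python) =====
-- def count_cases_with_repeated_activities(sequences):
--     return sum(1 for seq in sequences if len(set(seq)) != len(seq))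
-- ===== Notes on version B (the rewrite author's own statement) =====
-- stated objective: idiomatic
-- what changed: Replaces the explicit inner membership loop with early break and has_repeated flag by a one-line distinct-count comparison len(set(seq)) != len(seq) summed over the sequences.
import Mathlib
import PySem

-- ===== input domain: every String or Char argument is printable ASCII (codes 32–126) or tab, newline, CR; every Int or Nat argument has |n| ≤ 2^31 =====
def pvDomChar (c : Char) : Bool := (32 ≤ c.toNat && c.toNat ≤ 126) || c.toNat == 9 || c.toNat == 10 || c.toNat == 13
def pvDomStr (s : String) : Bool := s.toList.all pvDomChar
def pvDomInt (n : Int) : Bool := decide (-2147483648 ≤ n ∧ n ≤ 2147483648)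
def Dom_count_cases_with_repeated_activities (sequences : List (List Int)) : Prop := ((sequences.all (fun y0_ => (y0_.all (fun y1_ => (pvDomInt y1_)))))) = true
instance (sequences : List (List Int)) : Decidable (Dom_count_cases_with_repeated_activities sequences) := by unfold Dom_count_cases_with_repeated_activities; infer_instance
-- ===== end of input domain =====

-- B replaces A's inner membership loop with early break and flag by a len(set(seq)) != len(seq) comparison summed over the sequences (idiomatic; same cost).

-- ===== PORT A =====
-- inner 'for activity in act_seq: if activity in seen: has_repeated = True; break; seen.add(activity)'
def pvInnerA : List Int → PySem.Set Int → Bool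
  | [], _ => false
  | a :: rest, seen =>
      if PySem.Set.contains seen a then true
      else pvInnerA rest (PySem.Set.add seen a)

def count_cases_with_repeated_activities (sequences : List (List Int)) : Int :=
  sequences.foldl (fun cnt seq => if pvInnerA seq PySem.Set.empty then cnt + 1 else cnt) 0

-- ===== PORT B =====
def count_cases_with_repeated_activities_alt (sequences : List (List Int)) : Int :=
  ((sequences.filter (fun seq => (PySem.Set.ofList seq).length ≠ seq.length)).length : Int)

-- ===== PRECONDITION & SPEC =====
def Spec_count_cases_with_repeated_activities (sequences : List (List Int)) (out : Int) : Prop := out = count_cases_with_repeated_activities_alt sequences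
instance (sequences : List (List Int)) (out : Int) : Decidable (Spec_count_cases_with_repeated_activities sequences out) := by unfold Spec_count_cases_with_repeated_activities; infer_instance

-- ===== CLAIM (what is proved, stated in full; the proofs are below) =====
def Claim_equal_count_cases_with_repeated_activities : Prop := ∀ (sequences : List (List Int)), Dom_count_cases_with_repeated_activities sequences → Spec_count_cases_with_repeated_activities sequences (count_cases_with_repeated_activities sequences)

-- ===== LEMMAS AND PROOFS =====
lemma set_update_cons (s : PySem.Set Int) (a : Int) (l : List Int) :
    PySem.Set.update s (a :: l) = PySem.Set.update (PySem.Set.add s a) l := by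
  simp [PySem.Set.update, List.foldl]

lemma set_add_length (s : PySem.Set Int) (a : Int) :
    (PySem.Set.add s a).length = if PySem.Set.contains s a then s.length else s.length + 1 := by
  simp [PySem.Set.add]; split <;> simp

lemma set_update_length_le (l : List Int) (s : PySem.Set Int) :
    (PySem.Set.update s l).length ≤ s.length + l.length := by
  induction l generalizing s with
  | nil => simp [PySem.Set.update]
  | cons a rest ih =>
      rw [set_update_cons]
      calc (PySem.Set.update (PySem.Set.add s a) rest).length
          ≤ (PySem.Set.add s a).length + rest.length := ih _
        _ ≤ s.length + (a :: rest).length := by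
            rw [set_add_length]; split <;> simp <;> omega

lemma innerA_false (l : List Int) (s : PySem.Set Int) (h : pvInnerA l s = false) :
    (PySem.Set.update s l).length = s.length + l.length := by
  induction l generalizing s with
  | nil => simp [PySem.Set.update]
  | cons a rest ih =>
      rw [set_update_cons]
      simp only [pvInnerA] at h
      split at h
      · simp at h
      next hc =>
        rw [ih _ h, set_add_length, if_neg hc]
        simp only [List.length_cons]; omega

lemma innerA_true (l : List Int) (s : PySem.Set Int) (h : pvInnerA l s = true) :
    (PySem.Set.update s l).length < s.length + l.length := by
  induction l generalizing s with
  | nil => simp [pvInnerA] at h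
  | cons a rest ih =>
      rw [set_update_cons]
      simp only [pvInnerA] at h
      split at h
      next hc =>
        have hadd : PySem.Set.add s a = s := by unfold PySem.Set.add; rw [if_pos hc]
        rw [hadd]
        have := set_update_length_le rest s
        simp only [List.length_cons]; omega
      next hc =>
        have := ih _ h
        rw [set_add_length, if_neg hc] at this
        simp only [List.length_cons]; omega

lemma innerA_iff (l : List Int) :
    pvInnerA l PySem.Set.empty = ((PySem.Set.ofList l).length ≠ l.length : Bool) := by
  have hof : PySem.Set.ofList l = PySem.Set.update PySem.Set.empty l := by
    simp [PySem.Set.ofList_eq_foldl, PySem.Set.update]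
  cases h : pvInnerA l PySem.Set.empty with
  | false =>
      have := innerA_false l PySem.Set.empty h
      simp [PySem.Set.empty] at this
      simp [hof, PySem.Set.empty, this]
  | true =>
      have := innerA_true l PySem.Set.empty h
      simp [PySem.Set.empty] at this
      simp [hof, PySem.Set.empty]
      omega

lemma foldl_count (sequences : List (List Int)) (n : Int) :
    sequences.foldl (fun cnt seq => if pvInnerA seq PySem.Set.empty then cnt + 1 else cnt) n
      = n + ((sequences.filter (fun seq => (PySem.Set.ofList seq).length ≠ seq.length)).length : Int) := by
  induction sequences generalizing n with
  | nil => simp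
  | cons a rest ih =>
      simp only [List.foldl, List.filter]
      rw [ih, innerA_iff]
      by_cases h : (PySem.Set.ofList a).length ≠ a.length
      · simp [h]
        ring
      · simp [h]

-- ===== VERDICT (by name: the statement is the Claim_ definition above) =====
theorem count_cases_with_repeated_activities_spec : Claim_equal_count_cases_with_repeated_activities := by
  intro sequences _
  unfold Spec_count_cases_with_repeated_activities count_cases_with_repeated_activities count_cases_with_repeated_activities_alt
  rw [foldl_count]
  ring
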